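-- pv_equiv track=rewrite | github.com/MiladShahidi/BERT4ClickPath | Next-Basket-Recommendation/utils/data_generator.py | sort_batch_of_lists
-- ===== SOURCE A (Python) =====
-- def sort_batch_of_lists(uids, batch_of_baskets, lens, batch_of_dollar, batch_of_full_baskets):
--     """Sort batch of lists according to len(list). Descending"""
--     sorted_idx = [i[0] for i in sorted(enumerate(lens), key=lambda x: x[1], reverse=True)]
--     uids = [uids[i] for i in sorted_idx]
--     lens = [lens[i] for i in sorted_idx]
--     batch_of_baskets = [batch_of_baskets[i] for i in sorted_idx]
--     batch_of_dollar = [batch_of_dollar[i] for i in sorted_idx]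
--     batch_of_full_baskets = [batch_of_full_baskets[i] for i in sorted_idx]
--     return uids, batch_of_baskets, lens, batch_of_dollar, batch_of_full_baskets
-- ===== SOURCE B (Python) =====
-- def sort_batch_of_lists(uids, batch_of_baskets, lens, batch_of_dollar, batch_of_full_baskets):
--     """Sort batch of lists according to len(list). Descending"""
--     rows = sorted(zip(uids, batch_of_baskets, lens, batch_of_dollar, batch_of_full_baskets),
--                   key=lambda r: r[2], reverse=True)
--     if not rows:
--         return [], [], [], [], []
--     u, b, l, d, f = zip(*rows)
--     return list(u), list(b), list(l), list(d), list(f)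
-- ===== Notes on version B (the rewrite author's own statement) =====
-- stated objective: simpler
-- what changed: Instead of sorting an index permutation and gathering five lists through it by repeated indexing, B zips the five lists into records, stable-sorts the records once by the length field descending, and transposes back.
import Mathlib
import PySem

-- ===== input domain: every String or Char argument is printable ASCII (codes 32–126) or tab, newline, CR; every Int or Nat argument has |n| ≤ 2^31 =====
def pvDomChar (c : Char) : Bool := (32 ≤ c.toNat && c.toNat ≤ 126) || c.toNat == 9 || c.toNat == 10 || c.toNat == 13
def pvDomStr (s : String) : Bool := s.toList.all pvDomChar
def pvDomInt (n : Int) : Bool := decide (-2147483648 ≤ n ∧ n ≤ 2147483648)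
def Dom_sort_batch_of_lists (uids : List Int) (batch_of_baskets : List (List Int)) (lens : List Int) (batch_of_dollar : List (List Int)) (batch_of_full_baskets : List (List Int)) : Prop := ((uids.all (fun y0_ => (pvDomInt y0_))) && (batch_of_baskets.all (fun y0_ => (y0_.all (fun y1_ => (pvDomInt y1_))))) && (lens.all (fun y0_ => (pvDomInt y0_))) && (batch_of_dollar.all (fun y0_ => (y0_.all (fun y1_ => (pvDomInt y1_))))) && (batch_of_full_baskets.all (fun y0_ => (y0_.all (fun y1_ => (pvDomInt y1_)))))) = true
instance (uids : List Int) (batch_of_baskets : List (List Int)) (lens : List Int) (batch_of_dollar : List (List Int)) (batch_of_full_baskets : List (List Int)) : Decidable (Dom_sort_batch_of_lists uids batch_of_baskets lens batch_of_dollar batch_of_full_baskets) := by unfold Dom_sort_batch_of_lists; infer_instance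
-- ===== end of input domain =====

-- B replaces A's sort-an-index-permutation-then-gather-five-times scheme by a single
-- zip / stable sort by the length field (descending) / transpose; same asymptotic cost, simpler.

-- ===== PORT A =====
-- A: sorted_idx = indices of lens sorted by value, descending (stable); then gather each list through it.
def sort_batch_of_lists (uids : List Int) (batch_of_baskets : List (List Int)) (lens : List Int) (batch_of_dollar : List (List Int)) (batch_of_full_baskets : List (List Int)) : List Int × List (List Int) × List Int × List (List Int) × List (List Int) :=
  let sorted_idx := (PySem.List.sorted (PySem.List.enumerate lens) (fun x => x.2) true).map (fun x => x.1)
  let uids' := sorted_idx.map (fun i => PySem.List.pyGetD uids i 0)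
  let lens' := sorted_idx.map (fun i => PySem.List.pyGetD lens i 0)
  let batch_of_baskets' := sorted_idx.map (fun i => PySem.List.pyGetD batch_of_baskets i [])
  let batch_of_dollar' := sorted_idx.map (fun i => PySem.List.pyGetD batch_of_dollar i [])
  let batch_of_full_baskets' := sorted_idx.map (fun i => PySem.List.pyGetD batch_of_full_baskets i [])
  (uids', batch_of_baskets', lens', batch_of_dollar', batch_of_full_baskets')

-- ===== PORT B =====
-- B: zip the five lists into records, stable-sort by the lens field descending, transpose back.
def sort_batch_of_lists_alt (uids : List Int) (batch_of_baskets : List (List Int)) (lens : List Int) (batch_of_dollar : List (List Int)) (batch_of_full_baskets : List (List Int)) : List Int × List (List Int) × List Int × List (List Int) × List (List Int) :=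
  let rows := PySem.List.sorted (uids.zip (batch_of_baskets.zip (lens.zip (batch_of_dollar.zip batch_of_full_baskets)))) (fun r => r.2.2.1) true
  if rows.isEmpty then ([], [], [], [], [])
  else (rows.map (fun r => r.1), rows.map (fun r => r.2.1), rows.map (fun r => r.2.2.1), rows.map (fun r => r.2.2.2.1), rows.map (fun r => r.2.2.2.2))

-- ===== PRECONDITION & SPEC =====
-- Pre_ excludes exactly the inputs on which A raises IndexError: some gathered list shorter than lens.
def Pre_sort_batch_of_lists (uids : List Int) (batch_of_baskets : List (List Int)) (lens : List Int) (batch_of_dollar : List (List Int)) (batch_of_full_baskets : List (List Int)) : Prop :=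
  lens.length ≤ uids.length ∧ lens.length ≤ batch_of_baskets.length ∧ lens.length ≤ batch_of_dollar.length ∧ lens.length ≤ batch_of_full_baskets.length
instance (uids : List Int) (batch_of_baskets : List (List Int)) (lens : List Int) (batch_of_dollar : List (List Int)) (batch_of_full_baskets : List (List Int)) : Decidable (Pre_sort_batch_of_lists uids batch_of_baskets lens batch_of_dollar batch_of_full_baskets) := by unfold Pre_sort_batch_of_lists; infer_instance

def pvWitness_sort_batch_of_lists : List Int × List (List Int) × List Int × List (List Int) × List (List Int) :=
  ([7, 8], [[1], [2, 3]], [1, 2], [[4], [5]], [[1], [2, 3]])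

def Spec_sort_batch_of_lists (uids : List Int) (batch_of_baskets : List (List Int)) (lens : List Int) (batch_of_dollar : List (List Int)) (batch_of_full_baskets : List (List Int)) (out : List Int × List (List Int) × List Int × List (List Int) × List (List Int)) : Prop := out = sort_batch_of_lists_alt uids batch_of_baskets lens batch_of_dollar batch_of_full_baskets
instance (uids : List Int) (batch_of_baskets : List (List Int)) (lens : List Int) (batch_of_dollar : List (List Int)) (batch_of_full_baskets : List (List Int)) (out : List Int × List (List Int) × List Int × List (List Int) × List (List Int)) : Decidable (Spec_sort_batch_of_lists uids batch_of_baskets lens batch_of_dollar batch_of_full_baskets out) := by unfold Spec_sort_batch_of_lists; infer_instance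

-- ===== CLAIM (what is proved, stated in full; the proofs are below) =====
def Claim_equal_sort_batch_of_lists : Prop := ∀ (uids : List Int) (batch_of_baskets : List (List Int)) (lens : List Int) (batch_of_dollar : List (List Int)) (batch_of_full_baskets : List (List Int)), Dom_sort_batch_of_lists uids batch_of_baskets lens batch_of_dollar batch_of_full_baskets → Pre_sort_batch_of_lists uids batch_of_baskets lens batch_of_dollar batch_of_full_baskets → Spec_sort_batch_of_lists uids batch_of_baskets lens batch_of_dollar batch_of_full_baskets (sort_batch_of_lists uids batch_of_baskets lens batch_of_dollar batch_of_full_baskets)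

-- ===== LEMMAS AND PROOFS =====

-- map commutes with insertBy when the comparison only reads the image.
theorem insertBy_map {α β : Type} (g : α → β) (bef : β → β → Bool) (x : α) (ys : List α) :
    PySem.List.insertBy bef (g x) (ys.map g)
      = (PySem.List.insertBy (fun a b => bef (g a) (g b)) x ys).map g := by
  induction ys with
  | nil => rfl
  | cons y ys ih =>
    simp only [List.map_cons, PySem.List.insertBy]
    by_cases h : bef (g x) (g y)
    · simp [h]
    · simp [h, ih]

-- map commutes with the descending stable sort when the key factors through the map.
theorem sorted_rev_map {α β κ : Type} [LinearOrder κ] (g : α → β) (key : β → κ) (xs : List α) :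
    PySem.List.sorted (xs.map g) key true
      = (PySem.List.sorted xs (fun a => key (g a)) true).map g := by
  rw [PySem.List.sorted_rev_eq_foldl_insertBy, PySem.List.sorted_rev_eq_foldl_insertBy]
  suffices h : ∀ acc : List α,
      List.foldl (fun acc x => PySem.List.insertBy (fun a b => decide (key b < key a)) x acc) (acc.map g) (xs.map g)
        = (List.foldl (fun acc x => PySem.List.insertBy (fun a b => decide (key (g b) < key (g a))) x acc) acc xs).map g by
    simpa using h []
  induction xs with
  | nil => intro acc; rfl
  | cons x xs ih =>
    intro acc
    simp only [List.map_cons, List.foldl_cons]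
    rw [insertBy_map g (fun a b => decide (key b < key a)) x acc, ih]

-- The zipped record list is the enumeration of lens, gathered through the four other lists.
theorem rows_eq (uids : List Int) (batch_of_baskets : List (List Int)) (lens : List Int) (batch_of_dollar : List (List Int)) (batch_of_full_baskets : List (List Int))
    (h1 : lens.length ≤ uids.length) (h2 : lens.length ≤ batch_of_baskets.length)
    (h3 : lens.length ≤ batch_of_dollar.length) (h4 : lens.length ≤ batch_of_full_baskets.length) :
    uids.zip (batch_of_baskets.zip (lens.zip (batch_of_dollar.zip batch_of_full_baskets)))
      = (PySem.List.enumerate lens).map (fun p =>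
          (PySem.List.pyGetD uids p.1 0, PySem.List.pyGetD batch_of_baskets p.1 [], p.2,
           PySem.List.pyGetD batch_of_dollar p.1 [], PySem.List.pyGetD batch_of_full_baskets p.1 [])) := by
  apply List.ext_getElem
  · simp [PySem.List.length_enumerate]; omega
  · intro j hj hj'
    have hjl : j < lens.length := by
      simp [PySem.List.length_enumerate] at hj'; omega
    simp only [List.getElem_zip, List.getElem_map, PySem.List.getElem_enumerate]
    simp only [zero_add, PySem.List.pyGetD_natCast]
    rw [List.getD_eq_getElem _ _ (by omega), List.getD_eq_getElem _ _ (by omega),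
        List.getD_eq_getElem _ _ (by omega), List.getD_eq_getElem _ _ (by omega)]

theorem mem_S_snd (lens : List Int) (p : Int × Int)
    (hp : p ∈ PySem.List.sorted (PySem.List.enumerate lens) (fun x => x.2) true) :
    PySem.List.pyGetD lens p.1 0 = p.2 := by
  rw [PySem.List.mem_sorted, PySem.List.mem_enumerate_iff] at hp
  obtain ⟨k, hk, rfl⟩ := hp
  simp [PySem.List.pyGetD_natCast, List.getElem?_eq_getElem hk]

-- ===== VERDICT (by name: the statement is the Claim_ definition above) =====
theorem sort_batch_of_lists_spec : Claim_equal_sort_batch_of_lists := by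
  intro uids bb lens bd bf _ hpre
  obtain ⟨h1, h2, h3, h4⟩ := hpre
  unfold Spec_sort_batch_of_lists sort_batch_of_lists sort_batch_of_lists_alt
  rw [rows_eq uids bb lens bd bf h1 h2 h3 h4,
      sorted_rev_map (κ := Int)]
  set S := PySem.List.sorted (PySem.List.enumerate lens) (fun x => x.2) true with hS
  dsimp only
  split_ifs with hE
  · have hS0 : S = [] := by
      rw [List.isEmpty_iff, List.map_eq_nil_iff] at hE
      exact hE
    simp [hS0]
  · simp only [List.map_map]
    refine Prod.ext rfl (Prod.ext rfl (Prod.ext ?_ (Prod.ext rfl rfl)))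
    refine List.map_congr_left (fun p hp => ?_)
    simpa [Function.comp] using mem_S_snd lens p hp
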